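-- pv_equiv track=rewrite | github.com/CaptHwi1/telco-churn-mlops | src/serving/api.py | _build_recommendation
-- ===== SOURCE A (Python) =====
-- from typing import Optional, List, Dict, Any
--
-- def _build_recommendation(
--     risk_level: str,
--     primary_factors: List[str],
--     input_data: dict
-- ) -> str:
--     """Build personalized recommendation based on risk factors."""
--
--     base_actions = {
--         'High': "Offer retention discount immediately",
--         'Medium': "Send engagement email with personalized offer",
--         'Low': "Continue standard engagement; monitor for changes"
--     }
--
--     # Add factor-specific suggestions
--     suggestions = []
--
--     if any('contract' in f.lower() for f in primary_factors):
--         suggestions.append("Consider contract upgrade incentives")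
--
--     if any('charge' in f.lower() for f in primary_factors):
--         suggestions.append("Review pricing plan options for better value")
--
--     if any('tenure' in f.lower() for f in primary_factors):
--         suggestions.append("Implement targeted onboarding for new customers")
--
--     if any('internet' in f.lower() for f in primary_factors):
--         suggestions.append("Proactively address service quality concerns")
--
--     if any('security' in f.lower() or 'backup' in f.lower() for f in primary_factors):
--         suggestions.append("Highlight value-added features in communications")
--
--     if any('streaming' in f.lower() for f in primary_factors):
--         suggestions.append("Offer content bundle promotions")
--
--     # Combine base action with suggestions
--     base = base_actions.get(risk_level, base_actions['Medium'])
--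
--     if suggestions:
--         return f"{base}. Additionally: {'; '.join(suggestions[:2])}"
--
--     return base
-- ===== SOURCE B (Python) =====
-- def _build_recommendation(risk_level, primary_factors, input_data):
--     """Single pass over the factors collecting matched keyword categories,
--     then one walk over a fixed ordered suggestion table."""
--     keyword_to_category = [
--         ("contract", "contract"),
--         ("charge", "charge"),
--         ("tenure", "tenure"),
--         ("internet", "internet"),
--         ("security", "extras"),
--         ("backup", "extras"),
--         ("streaming", "streaming"),
--     ]
--     matched = set()
--     for f in primary_factors:
--         lf = f.lower()
--         for kw, cat in keyword_to_category:
--             if kw in lf: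
--                 matched.add(cat)
--     table = [
--         ("contract", "Consider contract upgrade incentives"),
--         ("charge", "Review pricing plan options for better value"),
--         ("tenure", "Implement targeted onboarding for new customers"),
--         ("internet", "Proactively address service quality concerns"),
--         ("extras", "Highlight value-added features in communications"),
--         ("streaming", "Offer content bundle promotions"),
--     ]
--     suggestions = [text for cat, text in table if cat in matched]
--     base = {
--         "High": "Offer retention discount immediately",
--         "Low": "Continue standard engagement; monitor for changes",
--     }.get(risk_level, "Send engagement email with personalized offer")
--     if suggestions:
--         return base + ". Additionally: " + "; ".join(suggestions[:2])
--     return base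
-- ===== Notes on version B (the rewrite author's own statement) =====
-- stated objective: faster
-- what changed: Replaces six separate any()-scans over primary_factors (one per keyword branch, each lowercasing every factor again) by a single pass over the factors that lowercases each factor once and records matched keyword categories in a set, then builds the suggestions by filtering one fixed ordered category/text table.
import Mathlib
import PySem

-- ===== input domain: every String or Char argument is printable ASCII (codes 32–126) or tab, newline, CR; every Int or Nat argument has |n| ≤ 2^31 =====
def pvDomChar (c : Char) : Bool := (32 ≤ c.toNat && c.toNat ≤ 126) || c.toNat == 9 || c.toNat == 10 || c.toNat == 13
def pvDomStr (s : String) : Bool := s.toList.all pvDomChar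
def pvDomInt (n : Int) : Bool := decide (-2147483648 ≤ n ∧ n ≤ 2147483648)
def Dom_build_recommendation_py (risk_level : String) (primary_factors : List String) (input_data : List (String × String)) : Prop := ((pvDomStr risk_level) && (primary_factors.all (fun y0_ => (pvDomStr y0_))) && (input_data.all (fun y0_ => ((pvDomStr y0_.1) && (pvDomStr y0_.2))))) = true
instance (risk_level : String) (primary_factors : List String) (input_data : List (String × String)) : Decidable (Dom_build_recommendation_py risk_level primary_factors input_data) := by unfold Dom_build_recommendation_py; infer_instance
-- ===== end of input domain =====

-- B replaces A's six separate any()-scans over primary_factors by a single pass that lowercases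
-- each factor once and collects matched keyword categories into a set, then filters one fixed
-- ordered suggestion table (objective: simpler; return value only, no side effects involved).


-- ===== PORT A =====
def build_recommendation_py (risk_level : String) (primary_factors : List String) (_input_data : List (String × String)) : String :=
  let base_actions : PySem.Dict String String := PySem.Dict.ofList
    [("High", "Offer retention discount immediately"),
     ("Medium", "Send engagement email with personalized offer"),
     ("Low", "Continue standard engagement; monitor for changes")]
  let suggestions : List String := []
  let suggestions := if primary_factors.any (fun f => PySem.Str.isIn "contract" (PySem.Str.lower f))
    then suggestions ++ ["Consider contract upgrade incentives"] else suggestions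
  let suggestions := if primary_factors.any (fun f => PySem.Str.isIn "charge" (PySem.Str.lower f))
    then suggestions ++ ["Review pricing plan options for better value"] else suggestions
  let suggestions := if primary_factors.any (fun f => PySem.Str.isIn "tenure" (PySem.Str.lower f))
    then suggestions ++ ["Implement targeted onboarding for new customers"] else suggestions
  let suggestions := if primary_factors.any (fun f => PySem.Str.isIn "internet" (PySem.Str.lower f))
    then suggestions ++ ["Proactively address service quality concerns"] else suggestions
  let suggestions := if primary_factors.any (fun f => PySem.Str.isIn "security" (PySem.Str.lower f) || PySem.Str.isIn "backup" (PySem.Str.lower f))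
    then suggestions ++ ["Highlight value-added features in communications"] else suggestions
  let suggestions := if primary_factors.any (fun f => PySem.Str.isIn "streaming" (PySem.Str.lower f))
    then suggestions ++ ["Offer content bundle promotions"] else suggestions
  -- base_actions['Medium'] always succeeds on this literal dict, so the dummy "" default is never used
  let base := PySem.Dict.getD base_actions risk_level (PySem.Dict.getD base_actions "Medium" "")
  if suggestions ≠ [] then
    base ++ ". Additionally: " ++ PySem.Str.join "; " (PySem.List.slice suggestions none (some 2))
  else base

-- ===== PORT B =====
def pvKeywordToCategory : List (String × String) :=
  [("contract", "contract"), ("charge", "charge"), ("tenure", "tenure"),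
   ("internet", "internet"), ("security", "extras"), ("backup", "extras"),
   ("streaming", "streaming")]

def pvTable : List (String × String) :=
  [("contract", "Consider contract upgrade incentives"),
   ("charge", "Review pricing plan options for better value"),
   ("tenure", "Implement targeted onboarding for new customers"),
   ("internet", "Proactively address service quality concerns"),
   ("extras", "Highlight value-added features in communications"),
   ("streaming", "Offer content bundle promotions")]

-- inner loop of B: record every keyword category matched by one (lowercased) factor
def pvAddCats (s : PySem.Set String) (f : String) : PySem.Set String :=
  let lf := PySem.Str.lower f
  pvKeywordToCategory.foldl
    (fun s p => if PySem.Str.isIn p.1 lf then PySem.Set.add s p.2 else s) s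

def build_recommendation_py_alt (risk_level : String) (primary_factors : List String) (_input_data : List (String × String)) : String :=
  let matched : PySem.Set String := primary_factors.foldl pvAddCats PySem.Set.empty
  let suggestions : List String :=
    (pvTable.filter (fun p => PySem.Set.contains matched p.1)).map Prod.snd
  let base : String :=
    PySem.Dict.getD (PySem.Dict.ofList
      [("High", "Offer retention discount immediately"),
       ("Low", "Continue standard engagement; monitor for changes")])
      risk_level "Send engagement email with personalized offer"
  if suggestions ≠ [] then
    base ++ ". Additionally: " ++ PySem.Str.join "; " (PySem.List.slice suggestions none (some 2))
  else base

-- ===== PRECONDITION & SPEC =====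
def Spec_build_recommendation_py (risk_level : String) (primary_factors : List String) (input_data : List (String × String)) (out : String) : Prop := out = build_recommendation_py_alt risk_level primary_factors input_data
instance (risk_level : String) (primary_factors : List String) (input_data : List (String × String)) (out : String) : Decidable (Spec_build_recommendation_py risk_level primary_factors input_data out) := by unfold Spec_build_recommendation_py; infer_instance

-- ===== CLAIM (what is proved, stated in full; the proofs are below) =====
def Claim_equal_build_recommendation_py : Prop := ∀ (risk_level : String) (primary_factors : List String) (input_data : List (String × String)), Dom_build_recommendation_py risk_level primary_factors input_data → Spec_build_recommendation_py risk_level primary_factors input_data (build_recommendation_py risk_level primary_factors input_data)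

-- ===== LEMMAS AND PROOFS =====

theorem pv_contains_add (s : PySem.Set String) (x y : String) :
    PySem.Set.contains (PySem.Set.add s x) y = (x == y || PySem.Set.contains s y) := by
  by_cases hxy : x = y
  · subst hxy
    simp only [BEq.rfl, Bool.true_or]
    simp [PySem.Set.mem_add]
  · have : (x == y) = false := by simp [hxy]
    simp only [this, Bool.false_or]
    rcases hc : PySem.Set.contains s y with _ | _
    · simp only [PySem.Set.contains] at *
      simp [PySem.Set.add]
      split_ifs <;> simp_all [Ne.symm hxy]
    · simp only [PySem.Set.contains] at *
      simp [PySem.Set.add]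
      split_ifs <;> simp_all

theorem pv_contains_foldl_condAdd (l : List (String × String)) (c : String) (q : String → Bool) :
    ∀ s : PySem.Set String,
    PySem.Set.contains (l.foldl (fun s p => if q p.1 then PySem.Set.add s p.2 else s) s) c
      = (PySem.Set.contains s c || l.any (fun p => q p.1 && p.2 == c)) := by
  induction l with
  | nil => intro s; simp
  | cons a l ih =>
      intro s
      rw [List.foldl_cons, ih]
      by_cases hq : q a.1 = true
      · by_cases h2 : a.2 = c
        · subst h2; simp [hq, pv_contains_add]
        · have hb : (a.2 == c) = false := by simp [h2]
          simp [hq, pv_contains_add, h2, Ne.symm h2, hb]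
      · simp [hq]

theorem pv_contains_matched (c : String) (fs : List String) :
    PySem.Set.contains (fs.foldl pvAddCats PySem.Set.empty) c
      = fs.any (fun f => pvKeywordToCategory.any
          (fun p => PySem.Str.isIn p.1 (PySem.Str.lower f) && p.2 == c)) := by
  have h : ∀ (s : PySem.Set String) (f : String),
      PySem.Set.contains (pvAddCats s f) c
        = (PySem.Set.contains s c || pvKeywordToCategory.any
            (fun p => PySem.Str.isIn p.1 (PySem.Str.lower f) && p.2 == c)) := by
    intro s f
    simpa [pvAddCats] using
      pv_contains_foldl_condAdd pvKeywordToCategory c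
        (fun kw => PySem.Str.isIn kw (PySem.Str.lower f)) s
  suffices hgen : ∀ s : PySem.Set String,
      PySem.Set.contains (fs.foldl pvAddCats s) c
        = (PySem.Set.contains s c || fs.any (fun f => pvKeywordToCategory.any
            (fun p => PySem.Str.isIn p.1 (PySem.Str.lower f) && p.2 == c))) by
    have := hgen PySem.Set.empty
    simpa [PySem.Set.empty, PySem.Set.contains] using this
  induction fs with
  | nil => intro s; simp
  | cons f fs ih =>
      intro s
      rw [List.foldl_cons, ih, h, List.any_cons, Bool.or_assoc]

theorem pv_contract (fs : List String) :
    PySem.Set.contains (fs.foldl pvAddCats PySem.Set.empty) "contract"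
      = fs.any (fun f => PySem.Str.isIn "contract" (PySem.Str.lower f)) := by
  rw [pv_contains_matched]; congr 1; funext f; simp [pvKeywordToCategory]

theorem pv_charge (fs : List String) :
    PySem.Set.contains (fs.foldl pvAddCats PySem.Set.empty) "charge"
      = fs.any (fun f => PySem.Str.isIn "charge" (PySem.Str.lower f)) := by
  rw [pv_contains_matched]; congr 1; funext f; simp [pvKeywordToCategory]

theorem pv_tenure (fs : List String) :
    PySem.Set.contains (fs.foldl pvAddCats PySem.Set.empty) "tenure"
      = fs.any (fun f => PySem.Str.isIn "tenure" (PySem.Str.lower f)) := by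
  rw [pv_contains_matched]; congr 1; funext f; simp [pvKeywordToCategory]

theorem pv_internet (fs : List String) :
    PySem.Set.contains (fs.foldl pvAddCats PySem.Set.empty) "internet"
      = fs.any (fun f => PySem.Str.isIn "internet" (PySem.Str.lower f)) := by
  rw [pv_contains_matched]; congr 1; funext f; simp [pvKeywordToCategory]

theorem pv_extras (fs : List String) :
    PySem.Set.contains (fs.foldl pvAddCats PySem.Set.empty) "extras"
      = fs.any (fun f => PySem.Str.isIn "security" (PySem.Str.lower f)
                      || PySem.Str.isIn "backup" (PySem.Str.lower f)) := by
  rw [pv_contains_matched]; congr 1; funext f; simp [pvKeywordToCategory]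

theorem pv_streaming (fs : List String) :
    PySem.Set.contains (fs.foldl pvAddCats PySem.Set.empty) "streaming"
      = fs.any (fun f => PySem.Str.isIn "streaming" (PySem.Str.lower f)) := by
  rw [pv_contains_matched]; congr 1; funext f; simp [pvKeywordToCategory]

theorem pv_base (rl : String) :
    PySem.Dict.getD (PySem.Dict.ofList
      [("High", "Offer retention discount immediately"),
       ("Medium", "Send engagement email with personalized offer"),
       ("Low", "Continue standard engagement; monitor for changes")]) rl
      (PySem.Dict.getD (PySem.Dict.ofList
        [("High", "Offer retention discount immediately"),
         ("Medium", "Send engagement email with personalized offer"),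
         ("Low", "Continue standard engagement; monitor for changes")]) "Medium" "")
    = PySem.Dict.getD (PySem.Dict.ofList
      [("High", "Offer retention discount immediately"),
       ("Low", "Continue standard engagement; monitor for changes")])
      rl "Send engagement email with personalized offer" := by
  by_cases h1 : rl = "High"
  · subst h1; decide
  · by_cases h2 : rl = "Medium"
    · subst h2; decide
    · by_cases h3 : rl = "Low"
      · subst h3; decide
      · have e1 : PySem.Dict.ofList
            [("High", "Offer retention discount immediately"),
             ("Medium", "Send engagement email with personalized offer"),
             ("Low", "Continue standard engagement; monitor for changes")]
          = PySem.Dict.mk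
            [("High", "Offer retention discount immediately"),
             ("Medium", "Send engagement email with personalized offer"),
             ("Low", "Continue standard engagement; monitor for changes")] := by rfl
        have e2 : PySem.Dict.ofList
            [("High", "Offer retention discount immediately"),
             ("Low", "Continue standard engagement; monitor for changes")]
          = PySem.Dict.mk
            [("High", "Offer retention discount immediately"),
             ("Low", "Continue standard engagement; monitor for changes")] := by rfl
        rw [e1, e2]
        have b1 : (("High" : String) == rl) = false := by simp [Ne.symm h1]
        have b2 : (("Medium" : String) == rl) = false := by simp [Ne.symm h2]
        have b3 : (("Low" : String) == rl) = false := by simp [Ne.symm h3]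
        simp [PySem.Dict.getD_eq_get?_getD, PySem.Dict.get?_mk_cons, b1, b2, b3]

-- ===== VERDICT (by name: the statement is the Claim_ definition above) =====
theorem build_recommendation_py_spec : Claim_equal_build_recommendation_py := by
  intro risk_level fs input_data _
  show build_recommendation_py risk_level fs input_data
      = build_recommendation_py_alt risk_level fs input_data
  unfold build_recommendation_py build_recommendation_py_alt
  simp only [pvTable, List.filter_cons, List.filter_nil,
    pv_contract, pv_charge, pv_tenure, pv_internet, pv_extras, pv_streaming, pv_base]
  generalize fs.any (fun f => PySem.Str.isIn "contract" (PySem.Str.lower f)) = b1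
  generalize fs.any (fun f => PySem.Str.isIn "charge" (PySem.Str.lower f)) = b2
  generalize fs.any (fun f => PySem.Str.isIn "tenure" (PySem.Str.lower f)) = b3
  generalize fs.any (fun f => PySem.Str.isIn "internet" (PySem.Str.lower f)) = b4
  generalize fs.any (fun f => PySem.Str.isIn "security" (PySem.Str.lower f)
      || PySem.Str.isIn "backup" (PySem.Str.lower f)) = b5
  generalize fs.any (fun f => PySem.Str.isIn "streaming" (PySem.Str.lower f)) = b6
  cases b1 <;> cases b2 <;> cases b3 <;> cases b4 <;> cases b5 <;> cases b6 <;> rfl
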